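-- pv_equiv track=rewrite | github.com/minarefaat1002/leetcode-solutions | 1856-maximum-subarray-min-product/1856-maximum-subarray-min-product.py | maxSumMinProduct
-- ===== SOURCE A (Python) =====
-- from typing import List
--
-- def maxSumMinProduct(nums: List[int]) -> int:
--     res = 0
--     stack = []
--     prefix = [0]
--     for n in nums:
--         prefix.append(prefix[-1]+n)
--     for i,n in enumerate(nums):
--         newstart = i
--         while stack and stack[-1][1]>n:
--             start ,val =stack.pop()
--             total = prefix[i]-prefix[start]
--             res = max(res,total*val)
--             newstart = start
--         stack.append((newstart,n))
--     for start ,val in stack: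
--         total = prefix[len(nums)] - prefix[start]
--         res = max(res,val*total)
--     return res%(10**9+7)
-- ===== SOURCE B (Python) =====
-- from typing import List
--
-- def maxSumMinProduct(nums: List[int]) -> int:
--     n = len(nums)
--     prefix = [0]
--     s = 0
--     for x in nums:
--         s += x
--         prefix.append(s)
--     best = 0
--     for i in range(n):
--         v = nums[i]
--         j = i - 1
--         while j >= 0 and nums[j] > v:
--             j -= 1
--         k = i + 1
--         while k < n and nums[k] >= v:
--             k += 1
--         cand = v * (prefix[k] - prefix[j + 1])
--         if cand > best:
--             best = cand
--     return best % (10 ** 9 + 7)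
-- ===== Notes on version B (the rewrite author's own statement) =====
-- stated objective: alternative
-- what changed: Replaced the single interleaved monotonic-stack pass (which computes window products at pop time and sweeps leftover stack entries at the end) by a per-element formulation: for each i, directly scan for the nearest left neighbour with value <= nums[i] and the nearest right neighbour with value < nums[i], and take the best nums[i]*(prefix[right]-prefix[left+1]); no stack at all.
import Mathlib
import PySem

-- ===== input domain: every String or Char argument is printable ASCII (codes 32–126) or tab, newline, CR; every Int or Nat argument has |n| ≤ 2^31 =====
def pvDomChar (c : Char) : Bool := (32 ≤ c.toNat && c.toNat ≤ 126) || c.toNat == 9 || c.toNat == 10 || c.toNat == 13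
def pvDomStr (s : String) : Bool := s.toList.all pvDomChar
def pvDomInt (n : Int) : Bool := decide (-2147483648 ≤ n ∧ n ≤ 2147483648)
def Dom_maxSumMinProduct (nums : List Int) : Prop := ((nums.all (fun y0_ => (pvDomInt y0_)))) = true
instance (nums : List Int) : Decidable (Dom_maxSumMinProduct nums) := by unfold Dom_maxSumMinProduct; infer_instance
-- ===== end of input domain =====

-- B replaces A's single interleaved monotonic-stack pass by a stack-free per-element
-- formulation (nearest smaller-or-equal neighbour to the left, nearest strictly smaller
-- to the right, candidate from prefix sums); objective: alternative decomposition.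

-- ===== PORT A =====
-- prefix = [0]; for n in nums: prefix.append(prefix[-1]+n)
def aPrefix (nums : List Int) : List Int :=
  nums.foldl (fun p x => p ++ [PySem.List.pyGetD p (-1) 0 + x]) [0]

-- the inner `while stack and stack[-1][1] > n:` loop; stack is head-first (head = top);
-- state (stack, res, newstart)
def popLoopA (pref : List Int) (i : Nat) (x : Int) :
    List (Nat × Int) → Int → Nat → List (Nat × Int) × Int × Nat
  | [], res, ns => ([], res, ns)
  | (s, v) :: rest, res, ns =>
      if v > x then
        popLoopA pref i x rest (max res ((pref.getD i 0 - pref.getD s 0) * v)) s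
      else ((s, v) :: rest, res, ns)

-- `for i,n in enumerate(nums):` with the running index as an explicit counter
def mainA (pref : List Int) : List Int → Nat → Int → List (Nat × Int) → Int × List (Nat × Int)
  | [], _, res, st => (res, st)
  | x :: xs, i, res, st =>
      let r := popLoopA pref i x st res i
      mainA pref xs (i + 1) r.2.1 ((r.2.2, x) :: r.1)

def maxSumMinProduct (nums : List Int) : Int :=
  let pref := aPrefix nums
  let r := mainA pref nums 0 0 []
  -- `for start, val in stack:` iterates bottom-to-top, i.e. over the reverse of our head-first stack
  let res2 := r.2.reverse.foldl
    (fun res (p : Nat × Int) => max res (p.2 * (pref.getD nums.length 0 - pref.getD p.1 0))) r.1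
  PySem.Int.mod res2 (10 ^ 9 + 7)

-- ===== PORT B =====
-- prefix = [0]; s = 0; for x in nums: s += x; prefix.append(s)
def bPrefix (nums : List Int) : List Int :=
  (nums.foldl (fun (ps : List Int × Int) x => (ps.1 ++ [ps.2 + x], ps.2 + x)) ([0], 0)).1

-- j = i-1; while j >= 0 and nums[j] > v: j -= 1   (returns final j)
def findLeft (nums : List Int) (v : Int) : Nat → Int
  | 0 => -1
  | j + 1 => if nums.getD j 0 > v then findLeft nums v j else (j : Int)

-- k = i+1; while k < n and nums[k] >= v: k += 1   (returns final k)
def findRight (nums : List Int) (v : Int) (k : Nat) : Nat :=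
  if h : k < nums.length then
    if nums.getD k 0 ≥ v then findRight nums v (k + 1) else k
  else nums.length
termination_by nums.length - k

def maxSumMinProduct_alt (nums : List Int) : Int :=
  let n := nums.length
  let pref := bPrefix nums
  let best := (List.range n).foldl (fun best i =>
      let v := nums.getD i 0
      let j := findLeft nums v i
      let k := findRight nums v (i + 1)
      let cand := v * (pref.getD k 0 - pref.getD (j + 1).toNat 0)
      if cand > best then cand else best) 0
  PySem.Int.mod best (10 ^ 9 + 7)

-- ===== PRECONDITION & SPEC =====
def Spec_maxSumMinProduct (nums : List Int) (out : Int) : Prop := out = maxSumMinProduct_alt nums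
instance (nums : List Int) (out : Int) : Decidable (Spec_maxSumMinProduct nums out) := by unfold Spec_maxSumMinProduct; infer_instance

-- ===== CLAIM (what is proved, stated in full; the proofs are below) =====
def Claim_equal_maxSumMinProduct : Prop := ∀ (nums : List Int), Dom_maxSumMinProduct nums → Spec_maxSumMinProduct nums (maxSumMinProduct nums)

-- ===== LEMMAS AND PROOFS =====

-- value of nums at index j
def gv (nums : List Int) (j : Nat) : Int := nums.getD j 0
-- right boundary of the maximal window in which j is a minimum (first k > j with nums[k] < nums[j], else n)
def priF (nums : List Int) (j : Nat) : Nat := findRight nums (gv nums j) (j + 1)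
-- left end of that window ((last k < j with nums[k] ≤ nums[j]) + 1, else 0)
def pleF (nums : List Int) (j : Nat) : Nat := (findLeft nums (gv nums j) j + 1).toNat
-- prefix sum
def psum (nums : List Int) (k : Nat) : Int := (nums.take k).sum
-- the candidate value contributed by index j
def candF (nums : List Int) (j : Nat) : Int :=
  gv nums j * (psum nums (priF nums j) - psum nums (pleF nums j))
-- the stack entry belonging to index j
def entryF (nums : List Int) (j : Nat) : Nat × Int := (pleF nums j, gv nums j)
-- indices still on the stack after the first i elements are processed (ascending)
def activeL (nums : List Int) (i : Nat) : List Nat :=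
  (List.range i).filter (fun j => decide (i ≤ priF nums j))
-- indices already popped after the first i elements are processed (ascending)
def doneL (nums : List Int) (i : Nat) : List Nat :=
  (List.range i).filter (fun j => decide (priF nums j < i))
-- the stack contents (head-first) after the first i elements
def stackSpec (nums : List Int) (i : Nat) : List (Nat × Int) :=
  (activeL nums i).reverse.map (entryF nums)
-- res after the first i elements
def resSpec (nums : List Int) (i : Nat) : Int :=
  (doneL nums i).foldl (fun r j => max r (candF nums j)) 0
-- the fold A and B both compute
def mfold (nums : List Int) (a : Int) (l : List Nat) : Int :=
  l.foldl (fun r j => max r (candF nums j)) a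

-- ---------- findRight characterization ----------

lemma FR_upper (nums : List Int) (v : Int) (t : Nat) : findRight nums v t ≤ nums.length := by
  have H : ∀ d t, nums.length - t ≤ d → findRight nums v t ≤ nums.length := by
    intro d
    induction d with
    | zero =>
      intro t ht
      rw [findRight]
      have h : ¬ t < nums.length := by omega
      simp [h]
    | succ d ih =>
      intro t ht
      rw [findRight]
      split_ifs with h1 h2
      · exact ih (t + 1) (by omega)
      · omega
      · omega
  exact H (nums.length - t) t le_rfl

lemma FR_lower (nums : List Int) (v : Int) (t : Nat) (h : t ≤ nums.length) :
    t ≤ findRight nums v t := by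
  have H : ∀ d t, nums.length - t ≤ d → t ≤ nums.length → t ≤ findRight nums v t := by
    intro d
    induction d with
    | zero =>
      intro t ht hle
      rw [findRight]
      have h : ¬ t < nums.length := by omega
      simp [h]; omega
    | succ d ih =>
      intro t ht hle
      rw [findRight]
      split_ifs with h1 h2
      · have := ih (t + 1) (by omega) (by omega)
        omega
      · omega
      · omega
  exact H (nums.length - t) t le_rfl h

lemma FR_mid (nums : List Int) (v : Int) (t : Nat) (k : Nat) (h1 : t ≤ k)
    (h2 : k < findRight nums v t) : v ≤ nums.getD k 0 := by
  have H : ∀ d t, nums.length - t ≤ d → ∀ k, t ≤ k → k < findRight nums v t →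
      v ≤ nums.getD k 0 := by
    intro d
    induction d with
    | zero =>
      intro t ht k hk1 hk2
      rw [findRight] at hk2
      have h : ¬ t < nums.length := by omega
      simp [h] at hk2
      omega
    | succ d ih =>
      intro t ht k hk1 hk2
      rw [findRight] at hk2
      split_ifs at hk2 with h1 h2
      · rcases Nat.eq_or_lt_of_le hk1 with heq | hlt
        · exact heq ▸ h2
        · exact ih (t + 1) (by omega) k hlt hk2
      · omega
      · omega
  exact H (nums.length - t) t le_rfl k h1 h2

lemma FR_stop (nums : List Int) (v : Int) (t : Nat) (h : findRight nums v t < nums.length) :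
    nums.getD (findRight nums v t) 0 < v := by
  have H : ∀ d t, nums.length - t ≤ d → findRight nums v t < nums.length →
      nums.getD (findRight nums v t) 0 < v := by
    intro d
    induction d with
    | zero =>
      intro t ht hlt
      rw [findRight] at hlt
      have h : ¬ t < nums.length := by omega
      simp [h] at hlt
    | succ d ih =>
      intro t ht hlt
      by_cases h1 : t < nums.length
      · by_cases h2 : nums.getD t 0 ≥ v
        · have he : findRight nums v t = findRight nums v (t + 1) := by
            rw [findRight, dif_pos h1, if_pos h2]
          rw [he] at hlt ⊢
          exact ih (t + 1) (by omega) hlt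
        · have he : findRight nums v t = t := by rw [findRight, dif_pos h1, if_neg h2]
          rw [he]
          exact lt_of_not_ge h2
      · have he : findRight nums v t = nums.length := by rw [findRight, dif_neg h1]
        rw [he] at hlt
        omega
  exact H (nums.length - t) t le_rfl h

lemma FR_ge_iff (nums : List Int) (v : Int) (t m : Nat) (h1 : t ≤ m) (h2 : m ≤ nums.length) :
    m ≤ findRight nums v t ↔ ∀ k, t ≤ k → k < m → v ≤ nums.getD k 0 := by
  constructor
  · intro h k hk1 hk2
    exact FR_mid nums v t k hk1 (by omega)
  · intro h
    by_contra hc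
    push_neg at hc
    have hfl : findRight nums v t < nums.length := by omega
    have hstop := FR_stop nums v t hfl
    have hlow := FR_lower nums v t (by omega)
    have := h (findRight nums v t) hlow (by omega)
    omega

-- ---------- findLeft characterization ----------

lemma FL_lb (nums : List Int) (v : Int) (i : Nat) : -1 ≤ findLeft nums v i := by
  induction i with
  | zero => simp [findLeft]
  | succ j ih =>
    rw [findLeft]
    split_ifs with h
    · exact ih
    · omega

lemma FL_ub (nums : List Int) (v : Int) (i : Nat) : findLeft nums v i < (i : Int) := by
  induction i with
  | zero => simp [findLeft]
  | succ j ih =>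
    rw [findLeft]
    split_ifs with h
    · push_cast; omega
    · push_cast; omega

lemma FL_mid (nums : List Int) (v : Int) (i : Nat) (k : Nat)
    (h1 : findLeft nums v i < (k : Int)) (h2 : k < i) : v < nums.getD k 0 := by
  induction i with
  | zero => omega
  | succ j ih =>
    rw [findLeft] at h1
    split_ifs at h1 with hc
    · rcases Nat.lt_succ_iff_lt_or_eq.mp h2 with hlt | heq
      · exact ih h1 hlt
      · exact heq ▸ hc
    · omega

lemma FL_stop (nums : List Int) (v : Int) (i : Nat) (h : 0 ≤ findLeft nums v i) :
    nums.getD (findLeft nums v i).toNat 0 ≤ v := by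
  induction i with
  | zero => simp [findLeft] at h
  | succ j ih =>
    by_cases hc : nums.getD j 0 > v
    · rw [findLeft] at h ⊢
      simp only [hc, if_true] at h ⊢
      exact ih h
    · rw [findLeft]
      simp only [hc, if_false]
      simpa using not_lt.mp hc

lemma FL_eq_of (nums : List Int) (v : Int) (i : Nat) (j : Int) (h1 : -1 ≤ j)
    (h2 : j < (i : Int))
    (hmid : ∀ k : Nat, j < (k : Int) → k < i → v < nums.getD k 0)
    (hstop : 0 ≤ j → nums.getD j.toNat 0 ≤ v) : findLeft nums v i = j := by
  induction i with
  | zero => simp [findLeft]; omega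
  | succ m ih =>
    by_cases hc : nums.getD m 0 > v
    · rw [findLeft]
      simp only [hc, if_true]
      have hjm : j < (m : Int) := by
        by_contra hge
        push_neg at hge
        have hjeq : j = (m : Int) := by omega
        have h0 : (0 : Int) ≤ j := by omega
        have := hstop h0
        rw [hjeq] at this
        simp only [Int.toNat_natCast] at this
        omega
      exact ih hjm (fun k hk1 hk2 => hmid k hk1 (by omega))
    · rw [findLeft]
      simp only [hc, if_false]
      by_contra hne
      have hjm : j < (m : Int) := by
        rcases lt_or_eq_of_le (by omega : j ≤ (m : Int)) with h | h
        · exact h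
        · exact absurd h.symm hne
      have hmlt : ((m : Nat) : Int) > j := by omega
      have := hmid m hmlt (by omega)
      omega

-- ---------- window-boundary facts ----------

lemma pri_upper (nums : List Int) (j : Nat) : priF nums j ≤ nums.length :=
  FR_upper nums (gv nums j) (j + 1)

lemma pri_lower (nums : List Int) (j : Nat) (hj : j < nums.length) : j + 1 ≤ priF nums j :=
  FR_lower nums (gv nums j) (j + 1) (by omega)

lemma pri_mid (nums : List Int) (j k : Nat) (h1 : j < k) (h2 : k < priF nums j) :
    gv nums j ≤ gv nums k :=
  FR_mid nums (gv nums j) (j + 1) k (by omega) h2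

lemma pri_stop (nums : List Int) (j : Nat) (h : priF nums j < nums.length) :
    gv nums (priF nums j) < gv nums j :=
  FR_stop nums (gv nums j) (j + 1) h

lemma active_iff (nums : List Int) (i j : Nat) (hj : j < i) (hi : i ≤ nums.length) :
    i ≤ priF nums j ↔ ∀ k, j < k → k < i → gv nums j ≤ gv nums k := by
  have := FR_ge_iff nums (gv nums j) (j + 1) i (by omega) hi
  rw [priF, this]
  constructor
  · intro h k hk1 hk2; exact h k (by omega) hk2
  · intro h k hk1 hk2; exact h k (by omega) hk2

lemma active_mono (nums : List Int) (i j j' : Nat) (hjj : j < j') (hj' : j' < i)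
    (haj : i ≤ priF nums j) : gv nums j ≤ gv nums j' :=
  pri_mid nums j j' hjj (by omega)

lemma pri_eq_of (nums : List Int) (i j : Nat) (hj : j < i) (hact : i ≤ priF nums j)
    (hlt : gv nums i < gv nums j) : priF nums j = i := by
  by_contra hne
  have : i < priF nums j := by omega
  have := pri_mid nums j i hj this
  omega

lemma pri_succ_of (nums : List Int) (i j : Nat) (hj : j < i) (hi : i < nums.length)
    (hact : i ≤ priF nums j) (hle : gv nums j ≤ gv nums i) : i + 1 ≤ priF nums j := by
  by_contra hne
  have heq : priF nums j = i := by omega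
  have := pri_stop nums j (by omega)
  rw [heq] at this
  omega

lemma pri_eq_iff (nums : List Int) (i j : Nat) (hj : j < i) (hi : i < nums.length) :
    priF nums j = i ↔ (i ≤ priF nums j ∧ gv nums i < gv nums j) := by
  constructor
  · intro h
    refine ⟨by omega, ?_⟩
    have := pri_stop nums j (by omega)
    rw [h] at this
    exact this
  · intro ⟨h1, h2⟩
    exact pri_eq_of nums i j hj h1 h2

lemma exists_active (nums : List Int) (i : Nat) (hi : i ≤ nums.length) (k : Nat) (hk : k < i) :
    ∃ a, k ≤ a ∧ a < i ∧ i ≤ priF nums a ∧ gv nums a ≤ gv nums k := by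
  have H : ∀ d k, i - k ≤ d → k < i →
      ∃ a, k ≤ a ∧ a < i ∧ i ≤ priF nums a ∧ gv nums a ≤ gv nums k := by
    intro d
    induction d with
    | zero => intro k hd hk; omega
    | succ d ih =>
      intro k hd hk
      by_cases hact : i ≤ priF nums k
      · exact ⟨k, le_rfl, hk, hact, le_rfl⟩
      · push_neg at hact
        have hk1 : k + 1 ≤ priF nums k := pri_lower nums k (by omega)
        have hst : gv nums (priF nums k) < gv nums k := pri_stop nums k (by omega)
        obtain ⟨a, ha1, ha2, ha3, ha4⟩ := ih (priF nums k) (by omega) hact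
        exact ⟨a, by omega, ha2, ha3, le_trans ha4 (le_of_lt hst)⟩
  exact H (i - k) k le_rfl hk

lemma ns_findLeft (nums : List Int) (i j0 : Nat) (hi : i < nums.length) (hj0 : j0 < i)
    (hact : i ≤ priF nums j0) (hx : gv nums i < gv nums j0)
    (hleast : ∀ k, k < j0 → ¬(i ≤ priF nums k ∧ gv nums i < gv nums k)) :
    findLeft nums (gv nums i) i = findLeft nums (gv nums j0) j0 := by
  have hk_big : ∀ k, j0 < k → k < i → gv nums j0 ≤ gv nums k := by
    intro k hk1 hk2
    obtain ⟨a, ha1, ha2, ha3, ha4⟩ := exists_active nums i (le_of_lt hi) k hk2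
    rcases Nat.eq_or_lt_of_le (by omega : j0 + 1 ≤ a) with heq | hlt
    · exact le_trans (active_mono nums i j0 a (by omega) ha2 hact) ha4
    · exact le_trans (active_mono nums i j0 a (by omega) ha2 hact) ha4
  have hLub := FL_ub nums (gv nums j0) j0
  have hLlb := FL_lb nums (gv nums j0) j0
  apply FL_eq_of
  · exact hLlb
  · have : (j0 : Int) < (i : Int) := by exact_mod_cast hj0
    omega
  · intro k hk1 hk2
    rcases Nat.lt_trichotomy k j0 with h | h | h
    · exact lt_trans hx (FL_mid nums (gv nums j0) j0 k hk1 h)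
    · exact h ▸ hx
    · exact lt_of_lt_of_le hx (hk_big k h hk2)
  · intro hL0
    set L := findLeft nums (gv nums j0) j0 with hLdef
    have hmj0 : L.toNat < j0 := by omega
    have hm_le : gv nums L.toNat ≤ gv nums j0 := FL_stop nums (gv nums j0) j0 hL0
    have hactm : i ≤ priF nums L.toNat := by
      rw [active_iff nums i L.toNat (by omega) (le_of_lt hi)]
      intro k hk1 hk2
      rcases Nat.lt_trichotomy k j0 with h | h | h
      · exact le_trans hm_le (le_of_lt (FL_mid nums (gv nums j0) j0 k (by omega) h))
      · exact le_trans hm_le (le_of_eq (by rw [h]))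
      · exact le_trans hm_le (hk_big k h hk2)
    have hle := hleast L.toNat hmj0
    have hnot : ¬ gv nums i < gv nums L.toNat := fun hcon => hle ⟨hactm, hcon⟩
    exact not_lt.mp hnot

lemma ns_nopop (nums : List Int) (i : Nat) (hi : i < nums.length)
    (hnone : ∀ k, k < i → i ≤ priF nums k → gv nums k ≤ gv nums i) :
    findLeft nums (gv nums i) i = (i : Int) - 1 := by
  cases i with
  | zero => simp [findLeft]
  | succ m =>
    have hactm : m + 1 ≤ priF nums m := pri_lower nums m (by omega)
    have hle := hnone m (Nat.lt_succ_self m) hactm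
    have hc : ¬ nums.getD m 0 > gv nums (m + 1) := not_lt.mpr hle
    rw [findLeft]
    simp only [hc, if_false]
    push_cast
    ring

-- ---------- the pop loop ----------

lemma popLoop_eq (pref : List Int) (i : Nat) (x : Int) :
    ∀ (P R : List (Nat × Int)) (res : Int) (ns : Nat),
      (∀ e ∈ P, x < e.2) → (∀ e ∈ R, e.2 ≤ x) →
      popLoopA pref i x (P ++ R) res ns =
        (R, P.foldl (fun r e => max r ((pref.getD i 0 - pref.getD e.1 0) * e.2)) res,
          (P.map Prod.fst).getLastD ns) := by
  intro P
  induction P with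
  | nil =>
    intro R res ns hP hR
    cases R with
    | nil => simp [popLoopA]
    | cons e R' =>
      obtain ⟨s, v⟩ := e
      have hv : v ≤ x := hR (s, v) (List.mem_cons_self)
      simp [popLoopA, not_lt.mpr hv]
  | cons e P' ih =>
    intro R res ns hP hR
    obtain ⟨s, v⟩ := e
    have hv : x < v := hP (s, v) (List.mem_cons_self)
    simp only [List.cons_append, popLoopA, hv, if_pos, List.foldl_cons, List.map_cons]
    rw [ih R _ s (fun e he => hP e (List.mem_cons_of_mem _ he)) hR]
    rw [List.getLastD_cons]

-- ---------- list splitting helpers ----------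

lemma filter_split_mono (l : List Nat) (q : Nat → Bool) (hp : l.Pairwise (· < ·))
    (hmono : ∀ a ∈ l, ∀ b ∈ l, a < b → q a = true → q b = true) :
    l = l.filter (fun a => !q a) ++ l.filter q := by
  induction l with
  | nil => simp
  | cons a t ih =>
    rw [List.pairwise_cons] at hp
    obtain ⟨ha, ht⟩ := hp
    cases hqa : q a with
    | false =>
      simp only [List.filter_cons, hqa, Bool.not_false, if_pos, cond_true, cond_false]
      rw [List.cons_append]
      congr 1
      exact ih ht (fun x hx y hy => hmono x (List.mem_cons_of_mem _ hx) y (List.mem_cons_of_mem _ hy))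
    | true =>
      have hall : ∀ b ∈ t, q b = true := fun b hb =>
        hmono a List.mem_cons_self b (List.mem_cons_of_mem _ hb) (ha b hb) hqa
      have h1 : (a :: t).filter (fun a => !q a) = [] := by
        rw [List.filter_eq_nil_iff]
        intro b hb
        rcases List.mem_cons.mp hb with h | h
        · subst h; simp [hqa]
        · simp [hall b h]
      have h2 : (a :: t).filter q = a :: t := by
        rw [List.filter_eq_self]
        intro b hb
        rcases List.mem_cons.mp hb with h | h
        · subst h; exact hqa
        · exact hall b h
      rw [h1, h2, List.nil_append]

lemma filter_or_perm (l : List Nat) (p q r : Nat → Bool)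
    (hr : ∀ a ∈ l, r a = (p a || q a)) (hdisj : ∀ a ∈ l, ¬(p a = true ∧ q a = true)) :
    (l.filter r).Perm (l.filter p ++ l.filter q) := by
  induction l with
  | nil => simp
  | cons a t ih =>
    have ih' := ih (fun x hx => hr x (List.mem_cons_of_mem _ hx))
      (fun x hx => hdisj x (List.mem_cons_of_mem _ hx))
    have hra := hr a List.mem_cons_self
    have hda := hdisj a List.mem_cons_self
    cases hpa : p a with
    | true =>
      have hqa : q a = false := by
        cases hqb : q a
        · rfl
        · exact absurd ⟨hpa, hqb⟩ hda
      simp only [List.filter_cons, hpa, hqa, hra, Bool.or_false, cond_true, cond_false]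
      exact (ih'.cons a)
    | false =>
      cases hqa : q a with
      | true =>
        simp only [List.filter_cons, hpa, hqa, hra, Bool.false_or, cond_true, cond_false]
        exact (ih'.cons a).trans List.perm_middle.symm
      | false =>
        simp only [List.filter_cons, hpa, hqa, hra, Bool.or_false, cond_false]
        exact ih'

-- ---------- prefix sums ----------

def sumsF (a : Int) : List Int → List Int
  | [] => []
  | x :: xs => (a + x) :: sumsF (a + x) xs

lemma pyGetD_append_last (p : List Int) (a : Int) :
    PySem.List.pyGetD (p ++ [a]) (-1) 0 = a := by
  simp [pysem]

lemma foldl_aPrefix (xs : List Int) : ∀ (p : List Int) (a : Int),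
    xs.foldl (fun p x => p ++ [PySem.List.pyGetD p (-1) 0 + x]) (p ++ [a]) =
      p ++ a :: sumsF a xs := by
  induction xs with
  | nil => intro p a; simp [sumsF]
  | cons x xs ih =>
    intro p a
    simp only [List.foldl_cons, pyGetD_append_last]
    rw [List.append_assoc p [a] [a + x], ← List.append_assoc p [a] [a+x]]
    have := ih (p ++ [a]) (a + x)
    rw [this]
    simp [sumsF]

lemma aPrefix_eq (nums : List Int) : aPrefix nums = 0 :: sumsF 0 nums := by
  have := foldl_aPrefix nums [] 0
  simpa [aPrefix] using this

lemma foldl_bPrefix (xs : List Int) : ∀ (p : List Int) (a : Int),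
    xs.foldl (fun (ps : List Int × Int) x => (ps.1 ++ [ps.2 + x], ps.2 + x)) (p ++ [a], a) =
      (p ++ a :: sumsF a xs, a + xs.sum) := by
  induction xs with
  | nil => intro p a; simp [sumsF]
  | cons x xs ih =>
    intro p a
    simp only [List.foldl_cons]
    have := ih (p ++ [a]) (a + x)
    rw [this]
    simp [sumsF, List.append_assoc]
    ring

lemma bPrefix_eq (nums : List Int) : bPrefix nums = 0 :: sumsF 0 nums := by
  have h := foldl_bPrefix nums [] 0
  simp only [List.nil_append] at h
  rw [bPrefix, h]

lemma sumsF_getD : ∀ (l : List Int) (a : Int) (k : Nat), k ≤ l.length →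
    (a :: sumsF a l).getD k 0 = a + (l.take k).sum := by
  intro l
  induction l with
  | nil =>
    intro a k hk
    have hk0 : k = 0 := by simpa using hk
    subst hk0
    simp
  | cons x xs ih =>
    intro a k hk
    cases k with
    | zero => simp
    | succ k =>
      simp only [sumsF, List.getD_cons_succ]
      have := ih (a + x) k (by simpa using hk)
      rw [this]
      simp [List.take_succ_cons]
      ring

lemma aPrefix_getD (nums : List Int) (k : Nat) (hk : k ≤ nums.length) :
    (aPrefix nums).getD k 0 = psum nums k := by
  rw [aPrefix_eq]
  have := sumsF_getD nums 0 k hk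
  simpa [psum] using this

lemma bPrefix_getD (nums : List Int) (k : Nat) (hk : k ≤ nums.length) :
    (bPrefix nums).getD k 0 = psum nums k := by
  rw [bPrefix_eq]
  have := sumsF_getD nums 0 k hk
  simpa [psum] using this

lemma ple_le (nums : List Int) (j : Nat) : pleF nums j ≤ j := by
  have h1 := FL_ub nums (gv nums j) j
  have h2 := FL_lb nums (gv nums j) j
  rw [pleF]
  omega

-- ---------- fold facts ----------

lemma mfold_perm (nums : List Int) (a : Int) {l l' : List Nat} (h : l.Perm l') :
    mfold nums a l = mfold nums a l' := by
  unfold mfold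
  exact h.foldl_eq (rcomm := ⟨fun b a1 a2 => max_right_comm b (candF nums a1) (candF nums a2)⟩) a

lemma mfold_append (nums : List Int) (a : Int) (l l' : List Nat) :
    mfold nums a (l ++ l') = mfold nums (mfold nums a l) l' := by
  unfold mfold
  exact List.foldl_append

-- ---------- activeL / doneL structure ----------

lemma mem_activeL (nums : List Int) (i j : Nat) :
    j ∈ activeL nums i ↔ j < i ∧ i ≤ priF nums j := by
  simp [activeL, List.mem_filter, List.mem_range]

lemma activeL_pairwise (nums : List Int) (i : Nat) : (activeL nums i).Pairwise (· < ·) :=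
  List.pairwise_lt_range.filter _

lemma getLastD_rev_cons (f : Nat → Nat) (a : Nat) (t : List Nat) (d : Nat) :
    ((a :: t).reverse.map f).getLastD d = f a := by
  rw [List.reverse_cons, List.map_append]
  simp

-- ---------- the main step ----------

lemma stepA (nums : List Int) (i : Nat) (hi : i < nums.length) :
    popLoopA (aPrefix nums) i (gv nums i) (stackSpec nums i) (resSpec nums i) i =
      (((activeL nums i).filter (fun j => !decide (gv nums i < gv nums j))).reverse.map (entryF nums),
        resSpec nums (i + 1), pleF nums i) := by
  have hsplit : activeL nums i =
      (activeL nums i).filter (fun j => !decide (gv nums i < gv nums j)) ++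
        (activeL nums i).filter (fun j => decide (gv nums i < gv nums j)) := by
    apply filter_split_mono
    · exact activeL_pairwise nums i
    · intro a ha b hb hab hqa
      have ha' := (mem_activeL nums i a).mp ha
      have hb' := (mem_activeL nums i b).mp hb
      have hmono := active_mono nums i a b hab hb'.1 ha'.2
      simp only [decide_eq_true_eq] at hqa ⊢
      omega
  have hstack : stackSpec nums i =
      ((activeL nums i).filter (fun j => decide (gv nums i < gv nums j))).reverse.map (entryF nums) ++
        ((activeL nums i).filter (fun j => !decide (gv nums i < gv nums j))).reverse.map (entryF nums) := by
    rw [stackSpec]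
    conv_lhs => rw [hsplit]
    rw [List.reverse_append, List.map_append]
  have hP : ∀ e ∈ ((activeL nums i).filter (fun j => decide (gv nums i < gv nums j))).reverse.map (entryF nums),
      gv nums i < e.2 := by
    intro e he
    simp only [List.mem_map, List.mem_reverse, List.mem_filter, decide_eq_true_eq] at he
    obtain ⟨j, ⟨_, hj2⟩, rfl⟩ := he
    simpa [entryF] using hj2
  have hR : ∀ e ∈ ((activeL nums i).filter (fun j => !decide (gv nums i < gv nums j))).reverse.map (entryF nums),
      e.2 ≤ gv nums i := by
    intro e he
    simp only [List.mem_map, List.mem_reverse, List.mem_filter, Bool.not_eq_true',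
      decide_eq_false_iff_not] at he
    obtain ⟨j, ⟨_, hj2⟩, rfl⟩ := he
    simpa [entryF] using not_lt.mp hj2
  rw [hstack, popLoop_eq _ _ _ _ _ _ _ hP hR]
  simp only [Prod.mk.injEq]
  refine ⟨trivial, ?_, ?_⟩
  · rw [List.foldl_map]
    have e1 : ((activeL nums i).filter (fun j => decide (gv nums i < gv nums j))).reverse.foldl
        (fun r j => max r (((aPrefix nums).getD i 0 - (aPrefix nums).getD (entryF nums j).1 0) * (entryF nums j).2))
        (resSpec nums i) =
        ((activeL nums i).filter (fun j => decide (gv nums i < gv nums j))).reverse.foldl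
          (fun r j => max r (candF nums j)) (resSpec nums i) := by
      apply PySem.List.foldl_congr_mem
      intro acc j hj
      simp only [List.mem_reverse, List.mem_filter, decide_eq_true_eq] at hj
      obtain ⟨hj1, hj2⟩ := hj
      have hj1' := (mem_activeL nums i j).mp hj1
      have hpri : priF nums j = i := pri_eq_of nums i j hj1'.1 hj1'.2 hj2
      have hple : pleF nums j ≤ nums.length := le_trans (ple_le nums j) (by omega)
      simp only [entryF]
      rw [aPrefix_getD nums i (by omega), aPrefix_getD nums (pleF nums j) hple]
      exact congrArg (max acc) (by rw [candF, hpri]; ring)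
    rw [e1]
    have e2 : ((activeL nums i).filter (fun j => decide (gv nums i < gv nums j))).reverse.foldl
        (fun r j => max r (candF nums j)) (resSpec nums i) =
        mfold nums (resSpec nums i) ((activeL nums i).filter (fun j => decide (gv nums i < gv nums j))) := by
      have := mfold_perm nums (resSpec nums i)
        (List.reverse_perm ((activeL nums i).filter (fun j => decide (gv nums i < gv nums j))))
      simpa [mfold] using this
    rw [e2]
    have hpop_eq : (activeL nums i).filter (fun j => decide (gv nums i < gv nums j)) =
        (List.range i).filter (fun j => decide (priF nums j = i)) := by
      rw [activeL, List.filter_filter]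
      apply List.filter_congr
      intro j hj
      rw [List.mem_range] at hj
      rw [Bool.eq_iff_iff]
      simp only [Bool.and_eq_true, decide_eq_true_eq]
      rw [pri_eq_iff nums i j hj hi]
      tauto
    have h1 : doneL nums (i + 1) = (List.range i).filter (fun j => decide (priF nums j < i + 1)) := by
      rw [doneL, List.range_succ, List.filter_append]
      have hpl := pri_lower nums i hi
      have h2 : [i].filter (fun j => decide (priF nums j < i + 1)) = [] := by
        simp only [List.filter_singleton]
        rw [decide_eq_false (by omega : ¬ priF nums i < i + 1)]
        rfl
      rw [h2, List.append_nil]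
    have h2 : ((List.range i).filter (fun j => decide (priF nums j < i + 1))).Perm
        (doneL nums i ++ (List.range i).filter (fun j => decide (priF nums j = i))) := by
      rw [doneL]
      apply filter_or_perm
      · intro a _
        rw [Bool.eq_iff_iff]
        simp only [Bool.or_eq_true, decide_eq_true_eq]
        omega
      · intro a _
        simp only [decide_eq_true_eq]
        omega
    have e3 : resSpec nums (i + 1) =
        mfold nums (resSpec nums i) ((activeL nums i).filter (fun j => decide (gv nums i < gv nums j))) := by
      have e4 : resSpec nums (i + 1) = mfold nums 0 (doneL nums (i + 1)) := rfl
      rw [e4, h1, mfold_perm nums 0 h2, mfold_append, hpop_eq]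
      rfl
    rw [e3]
  · rw [List.map_map]
    rcases hp : (activeL nums i).filter (fun j => decide (gv nums i < gv nums j)) with _ | ⟨j0, pop'⟩
    · simp only [List.reverse_nil, List.map_nil, List.getLastD_nil]
      have hnone : ∀ k, k < i → i ≤ priF nums k → gv nums k ≤ gv nums i := by
        intro k hk hact
        by_contra hc
        push_neg at hc
        have hkm : k ∈ (activeL nums i).filter (fun j => decide (gv nums i < gv nums j)) := by
          rw [List.mem_filter, mem_activeL]
          exact ⟨⟨hk, hact⟩, by simpa using hc⟩
        rw [hp] at hkm
        simp at hkm
      have hns := ns_nopop nums i hi hnone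
      show i = pleF nums i
      simp only [pleF, hns]
      omega
    · have hj0mem : j0 ∈ (activeL nums i).filter (fun j => decide (gv nums i < gv nums j)) := by
        rw [hp]; exact List.mem_cons_self
      rw [List.mem_filter, mem_activeL] at hj0mem
      obtain ⟨⟨hj0lt, hj0act⟩, hj0x⟩ := hj0mem
      have hj0x' : gv nums i < gv nums j0 := of_decide_eq_true hj0x
      have hL : findLeft nums (gv nums i) i = findLeft nums (gv nums j0) j0 := by
        apply ns_findLeft nums i j0 hi hj0lt hj0act hj0x'
        intro k hk hcon
        have hkm : k ∈ (activeL nums i).filter (fun j => decide (gv nums i < gv nums j)) := by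
          rw [List.mem_filter, mem_activeL]
          exact ⟨⟨by omega, hcon.1⟩, by simpa using hcon.2⟩
        have hpw : ((activeL nums i).filter (fun j => decide (gv nums i < gv nums j))).Pairwise (· < ·) :=
          (activeL_pairwise nums i).filter _
        rw [hp] at hkm hpw
        rw [List.pairwise_cons] at hpw
        rcases List.mem_cons.mp hkm with h | h
        · omega
        · have := hpw.1 k h; omega
      rw [getLastD_rev_cons]
      show pleF nums j0 = pleF nums i
      simp only [pleF, hL]

lemma stack_succ (nums : List Int) (i : Nat) (hi : i < nums.length) :
    stackSpec nums (i + 1) =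
      (pleF nums i, gv nums i) ::
        ((activeL nums i).filter (fun j => !decide (gv nums i < gv nums j))).reverse.map (entryF nums) := by
  have hact : activeL nums (i + 1) =
      (activeL nums i).filter (fun j => !decide (gv nums i < gv nums j)) ++ [i] := by
    rw [activeL, List.range_succ, List.filter_append]
    have hpl := pri_lower nums i hi
    have h1 : [i].filter (fun j => decide (i + 1 ≤ priF nums j)) = [i] := by
      simp only [List.filter_singleton]
      rw [decide_eq_true (by omega : i + 1 ≤ priF nums i)]
      rfl
    rw [h1]
    congr 1
    rw [activeL, List.filter_filter]
    apply List.filter_congr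
    intro j hj
    rw [List.mem_range] at hj
    rw [Bool.eq_iff_iff]
    simp only [Bool.and_eq_true, Bool.not_eq_true', decide_eq_false_iff_not, decide_eq_true_eq]
    constructor
    · intro h
      have hnotx : ¬ gv nums i < gv nums j := by
        intro hx
        have := pri_eq_of nums i j hj (by omega) hx
        omega
      exact ⟨hnotx, by omega⟩
    · intro ⟨hnotx, hge⟩
      exact pri_succ_of nums i j hj hi hge (not_lt.mp hnotx)
  rw [stackSpec, hact, List.reverse_append, List.map_append]
  simp [entryF]

lemma mainA_step (nums : List Int) (i : Nat) (hi : i < nums.length) :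
    mainA (aPrefix nums) (gv nums i :: nums.drop (i + 1)) i (resSpec nums i) (stackSpec nums i) =
      mainA (aPrefix nums) (nums.drop (i + 1)) (i + 1) (resSpec nums (i + 1)) (stackSpec nums (i + 1)) := by
  have hstep := stepA nums i hi
  simp only [mainA, hstep]
  rw [← stack_succ nums i hi]

lemma main_inv (nums : List Int) : ∀ d i, nums.length - i ≤ d → i ≤ nums.length →
    mainA (aPrefix nums) (nums.drop i) i (resSpec nums i) (stackSpec nums i) =
      (resSpec nums nums.length, stackSpec nums nums.length) := by
  intro d
  induction d with
  | zero =>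
    intro i hd hle
    have h : i = nums.length := by omega
    subst h
    simp [List.drop_length, mainA]
  | succ d ih =>
    intro i hd hle
    rcases Nat.eq_or_lt_of_le hle with heq | hlt
    · subst heq
      simp [List.drop_length, mainA]
    · rw [List.drop_eq_getElem_cons hlt]
      have hx : nums[i] = gv nums i := (List.getD_eq_getElem nums 0 hlt).symm
      rw [hx, mainA_step nums i hlt]
      exact ih (i + 1) (by omega) (by omega)

lemma A_closed (nums : List Int) :
    maxSumMinProduct nums = PySem.Int.mod (mfold nums 0 (List.range nums.length)) (10 ^ 9 + 7) := by
  have h0res : resSpec nums 0 = 0 := rfl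
  have h0st : stackSpec nums 0 = [] := rfl
  have hmain := main_inv nums nums.length 0 (by omega) (by omega)
  rw [h0res, h0st, List.drop_zero] at hmain
  simp only [maxSumMinProduct, hmain]
  congr 1
  have hrev : (stackSpec nums nums.length).reverse = (activeL nums nums.length).map (entryF nums) := by
    rw [stackSpec, List.map_reverse, List.reverse_reverse]
  rw [hrev, List.foldl_map]
  have e1 : (activeL nums nums.length).foldl
      (fun res j => max res ((entryF nums j).2 * ((aPrefix nums).getD nums.length 0 - (aPrefix nums).getD (entryF nums j).1 0)))
      (resSpec nums nums.length) =
      (activeL nums nums.length).foldl (fun r j => max r (candF nums j)) (resSpec nums nums.length) := by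
    apply PySem.List.foldl_congr_mem
    intro acc j hj
    have hj' := (mem_activeL nums nums.length j).mp hj
    have hpri : priF nums j = nums.length := le_antisymm (pri_upper nums j) hj'.2
    have hple : pleF nums j ≤ nums.length := le_trans (ple_le nums j) (by omega)
    simp only [entryF]
    rw [aPrefix_getD nums nums.length le_rfl, aPrefix_getD nums (pleF nums j) hple]
    exact congrArg (max acc) (by rw [candF, hpri])
  rw [e1]
  have e2 : (activeL nums nums.length).foldl (fun r j => max r (candF nums j)) (resSpec nums nums.length) =
      mfold nums 0 (doneL nums nums.length ++ activeL nums nums.length) := by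
    rw [mfold_append]
    rfl
  rw [e2]
  have hco : activeL nums nums.length =
      (List.range nums.length).filter (fun j => !decide (priF nums j < nums.length)) := by
    rw [activeL]
    apply List.filter_congr
    intro j hj
    rw [Bool.eq_iff_iff]
    simp only [Bool.not_eq_true', decide_eq_false_iff_not, decide_eq_true_eq]
    omega
  have hperm : (doneL nums nums.length ++ activeL nums nums.length).Perm (List.range nums.length) := by
    rw [hco, doneL]
    exact List.filter_append_perm _ _
  exact mfold_perm nums 0 hperm

lemma B_closed (nums : List Int) :
    maxSumMinProduct_alt nums = PySem.Int.mod (mfold nums 0 (List.range nums.length)) (10 ^ 9 + 7) := by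
  simp only [maxSumMinProduct_alt]
  congr 1
  have e1 : (List.range nums.length).foldl
      (fun best i => if nums.getD i 0 *
          ((bPrefix nums).getD (findRight nums (nums.getD i 0) (i + 1)) 0 -
            (bPrefix nums).getD (findLeft nums (nums.getD i 0) i + 1).toNat 0) > best
        then nums.getD i 0 *
          ((bPrefix nums).getD (findRight nums (nums.getD i 0) (i + 1)) 0 -
            (bPrefix nums).getD (findLeft nums (nums.getD i 0) i + 1).toNat 0)
        else best) 0 =
      (List.range nums.length).foldl (fun r j => max r (candF nums j)) 0 := by
    apply PySem.List.foldl_congr_mem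
    intro acc i hi
    rw [List.mem_range] at hi
    have hcand : nums.getD i 0 *
        ((bPrefix nums).getD (findRight nums (nums.getD i 0) (i + 1)) 0 -
          (bPrefix nums).getD (findLeft nums (nums.getD i 0) i + 1).toNat 0) = candF nums i := by
      have h1 : findRight nums (nums.getD i 0) (i + 1) = priF nums i := rfl
      have h2 : (findLeft nums (nums.getD i 0) i + 1).toNat = pleF nums i := rfl
      rw [h1, h2, bPrefix_getD nums (priF nums i) (pri_upper nums i),
        bPrefix_getD nums (pleF nums i) (le_trans (ple_le nums i) (by omega))]
      rfl
    rw [hcand]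
    rcases lt_or_ge acc (candF nums i) with h | h
    · rw [if_pos h, max_eq_right h.le]
    · rw [if_neg (not_lt.mpr h), max_eq_left h]
  rw [e1]
  rfl

-- ===== VERDICT (by name: the statement is the Claim_ definition above) =====
theorem maxSumMinProduct_spec : Claim_equal_maxSumMinProduct := by
  unfold Claim_equal_maxSumMinProduct Spec_maxSumMinProduct
  intro nums _
  rw [A_closed, B_closed]
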